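-- pv_equiv track=rewrite | github.com/cratpij/logslice | logslice/segment.py | segment_by_field
-- ===== SOURCE A (Python) =====
-- from typing import Any, Callable, Dict, Iterable, Iterator, List, Optional, Tuple
--
-- def segment_by_field(
--     records: Iterable[Dict],
--     field: str,
--     boundaries: List[Tuple[Any, str]],
--     default: str = "other",
-- ) -> Iterator[Dict]:
--     """Tag each record with a segment label based on ordered field boundaries.
--
--     boundaries: list of (threshold, label) pairs, sorted ascending by threshold.
--     Each record is assigned the label of the highest threshold it meets.
--     """
--     for record in records:
--         label = default
--         val = record.get(field)
--         if val is not None: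
--             for threshold, seg_label in boundaries:
--                 if str(val) >= str(threshold):
--                     label = seg_label
--         yield {**record, "_segment": label}
-- ===== SOURCE B (Python) =====
-- def segment_by_field(records, field, boundaries, default="other"):
--     # Keep only "effective" boundaries (those not overridden by a later, <= threshold);
--     # their thresholds are strictly increasing, so each record needs one binary search.
--     keys = []
--     labels = []
--     for t, l in reversed(boundaries):
--         k = str(t)
--         if not keys or k < keys[-1]:
--             keys.append(k)
--             labels.append(l)
--     keys.reverse()
--     labels.reverse()
--     for record in records:
--         val = record.get(field)
--         if val is None:
--             label = default
--         else:
--             s = str(val)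
--             lo, hi = 0, len(keys)
--             while lo < hi:
--                 mid = (lo + hi) // 2
--                 if keys[mid] <= s:
--                     lo = mid + 1
--                 else:
--                     hi = mid
--             label = default if lo == 0 else labels[lo - 1]
--         yield {**record, "_segment": label}
-- ===== Notes on version B (the rewrite author's own statement) =====
-- stated objective: alternative
-- what changed: B precomputes once the strictly-increasing list of effective boundaries (entries not overridden by a later threshold that is <= theirs) and answers each record with a single hand-written binary search over it, instead of A's full scan of all boundaries for every record.
import Mathlib
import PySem

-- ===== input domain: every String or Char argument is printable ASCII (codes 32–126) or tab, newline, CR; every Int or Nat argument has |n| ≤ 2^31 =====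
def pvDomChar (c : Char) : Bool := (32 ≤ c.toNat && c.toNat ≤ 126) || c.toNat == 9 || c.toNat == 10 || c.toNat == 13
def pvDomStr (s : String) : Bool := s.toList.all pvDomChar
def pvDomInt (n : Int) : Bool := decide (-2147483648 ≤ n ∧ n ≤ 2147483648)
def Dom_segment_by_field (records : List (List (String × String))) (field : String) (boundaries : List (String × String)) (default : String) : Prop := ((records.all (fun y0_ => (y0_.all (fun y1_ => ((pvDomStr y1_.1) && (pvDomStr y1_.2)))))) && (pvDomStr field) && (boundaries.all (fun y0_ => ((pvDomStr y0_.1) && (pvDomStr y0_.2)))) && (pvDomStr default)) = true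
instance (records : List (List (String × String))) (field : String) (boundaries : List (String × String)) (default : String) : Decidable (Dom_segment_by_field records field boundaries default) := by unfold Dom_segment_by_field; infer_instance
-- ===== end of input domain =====

-- B replaces A's per-record scan of all boundaries by a once-precomputed strictly increasing
-- "effective boundary" list plus one binary search per record (objective: alternative).

-- ===== PORT A =====
-- for record in records: label=default; val=record.get(field); if val is not None: for each
-- (threshold, seg_label): if str(val) >= str(threshold): label=seg_label; yield {**record, "_segment": label}
def segment_by_field (records : List (List (String × String))) (field : String) (boundaries : List (String × String)) (default : String) : List (List (String × String)) :=
  records.map (fun record =>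
    let d := PySem.Dict.mk record
    let label :=
      match d.get? field with
      | none => default
      | some v => boundaries.foldl (fun lab p => if p.1 ≤ v then p.2 else lab) default
    (d.insert "_segment" label).items)

-- ===== PORT B =====
-- loop body of Source B's reversed() precompute pass: keep (k, l) iff keys is empty or k < keys[-1];
-- Source B appends and finally reverses both lists — here the foldl conses, which builds the same
-- reversed-at-the-end lists directly.
def sbfStep (kl : List String × List String) (p : String × String) : List String × List String :=
  if kl.1 = [] ∨ p.1 < kl.1.headD "" then (p.1 :: kl.1, p.2 :: kl.2) else kl

-- Source B's hand-written while loop: lo, hi = 0, len(keys); while lo < hi: mid=(lo+hi)//2; ...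
def sbfLoop (keys : List String) (s : String) (lo hi : Nat) : Nat :=
  if lo < hi then
    let mid := (lo + hi) / 2
    if keys.getD mid "" ≤ s then sbfLoop keys s (mid + 1) hi else sbfLoop keys s lo mid
  else lo
termination_by hi - lo
decreasing_by all_goals omega

def segment_by_field_alt (records : List (List (String × String))) (field : String) (boundaries : List (String × String)) (default : String) : List (List (String × String)) :=
  let kl := boundaries.reverse.foldl sbfStep ([], [])
  records.map (fun record =>
    let d := PySem.Dict.mk record
    let label :=
      match d.get? field with
      | none => default
      | some s =>
        let lo := sbfLoop kl.1 s 0 kl.1.length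
        if lo = 0 then default else kl.2.getD (lo - 1) default
    (d.insert "_segment" label).items)

-- ===== PRECONDITION & SPEC =====
def Spec_segment_by_field (records : List (List (String × String))) (field : String) (boundaries : List (String × String)) (default : String) (out : List (List (String × String))) : Prop := out = segment_by_field_alt records field boundaries default
instance (records : List (List (String × String))) (field : String) (boundaries : List (String × String)) (default : String) (out : List (List (String × String))) : Decidable (Spec_segment_by_field records field boundaries default out) := by unfold Spec_segment_by_field; infer_instance

-- ===== CLAIM (what is proved, stated in full; the proofs are below) =====
def Claim_equal_segment_by_field : Prop := ∀ (records : List (List (String × String))) (field : String) (boundaries : List (String × String)) (default : String), Dom_segment_by_field records field boundaries default → Spec_segment_by_field records field boundaries default (segment_by_field records field boundaries default)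

-- ===== LEMMAS AND PROOFS =====

-- the "effective" boundary list: entry kept iff every later threshold is strictly greater
def effList : List (String × String) → List (String × String)
  | [] => []
  | p :: rest =>
    match effList rest with
    | [] => [p]
    | q :: t => if p.1 < q.1 then p :: q :: t else q :: t

lemma effList_cons_nil {p : String × String} {rest : List (String × String)}
    (h : effList rest = []) : effList (p :: rest) = [p] := by
  simp [effList, h]

lemma effList_cons_lt {p q : String × String} {rest t : List (String × String)}
    (h : effList rest = q :: t) (hlt : p.1 < q.1) : effList (p :: rest) = p :: q :: t := by
  simp [effList, h, hlt]

lemma effList_cons_ge {p q : String × String} {rest t : List (String × String)}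
    (h : effList rest = q :: t) (hge : ¬ p.1 < q.1) : effList (p :: rest) = q :: t := by
  simp [effList, h, hge]

lemma effFold (bs : List (String × String)) :
    bs.reverse.foldl sbfStep ([], []) = ((effList bs).map Prod.fst, (effList bs).map Prod.snd) := by
  induction bs with
  | nil => rfl
  | cons p rest ih =>
    rw [List.reverse_cons, List.foldl_append, ih, List.foldl_cons, List.foldl_nil]
    cases h : effList rest with
    | nil => rw [effList_cons_nil h]; simp [sbfStep]
    | cons q t =>
      by_cases hlt : p.1 < q.1
      · rw [effList_cons_lt h hlt]; simp [sbfStep, hlt]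
      · rw [effList_cons_ge h hlt]; simp [sbfStep, hlt]

lemma eff_mem {bs : List (String × String)} {x : String × String} (hx : x ∈ effList bs) : x ∈ bs := by
  induction bs with
  | nil => simp [effList] at hx
  | cons p rest ih =>
    cases h : effList rest with
    | nil =>
      rw [effList_cons_nil h] at hx
      simp at hx; simp [hx]
    | cons q t =>
      have sub : x ∈ q :: t → x ∈ p :: rest :=
        fun hm => List.mem_cons_of_mem _ (ih (by rw [h]; exact hm))
      by_cases hlt : p.1 < q.1
      · rw [effList_cons_lt h hlt] at hx
        rcases List.mem_cons.mp hx with rfl | hm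
        · exact List.mem_cons_self
        · exact sub hm
      · rw [effList_cons_ge h hlt] at hx
        exact sub hx

lemma eff_sorted (bs : List (String × String)) :
    (effList bs).Pairwise (fun a b => a.1 < b.1) := by
  induction bs with
  | nil => simp [effList]
  | cons p rest ih =>
    cases h : effList rest with
    | nil => rw [effList_cons_nil h]; simp
    | cons q t =>
      rw [h] at ih
      by_cases hlt : p.1 < q.1
      · rw [effList_cons_lt h hlt]
        refine List.Pairwise.cons ?_ ih
        intro b hb
        rcases List.mem_cons.mp hb with rfl | hb
        · exact hlt
        · exact lt_trans hlt ((List.pairwise_cons.mp ih).1 b hb)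
      · rw [effList_cons_ge h hlt]
        exact ih

lemma eff_find (bs : List (String × String)) (s : String) :
    (effList bs).reverse.find? (fun p => decide (p.1 ≤ s)) = bs.reverse.find? (fun p => decide (p.1 ≤ s)) := by
  induction bs with
  | nil => rfl
  | cons p rest ih =>
    rw [List.reverse_cons, List.find?_append]
    cases h : effList rest with
    | nil =>
      rw [h] at ih
      simp only [List.reverse_nil, List.find?_nil] at ih
      rw [effList_cons_nil h, ← ih, Option.none_or]
      rfl
    | cons q t =>
      rw [h] at ih
      by_cases hlt : p.1 < q.1
      · rw [effList_cons_lt h hlt, List.reverse_cons, List.find?_append, ih]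
      · rw [effList_cons_ge h hlt, ih]
        cases hf : rest.reverse.find? (fun p => decide (p.1 ≤ s)) with
        | some r => rw [Option.some_or]
        | none =>
          -- no element of rest matches; q ∈ rest and q.1 ≤ p.1, so p cannot match either
          have hq : q ∈ rest := eff_mem (x := q) (by rw [h]; exact List.mem_cons_self)
          have hnq : ¬ (q.1 ≤ s) := by
            have := List.find?_eq_none.mp hf q (by simpa using hq)
            simpa using this
          have hnp : ¬ (p.1 ≤ s) := fun hp => hnq (le_trans (not_lt.mp hlt) hp)
          rw [Option.none_or, List.find?_cons_of_neg (by simpa using hnp), List.find?_nil]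

lemma foldA_eq_find (bs : List (String × String)) (s d : String) :
    bs.foldl (fun lab p => if p.1 ≤ s then p.2 else lab) d
      = ((bs.reverse.find? (fun p => decide (p.1 ≤ s))).map Prod.snd).getD d := by
  induction bs using List.reverseRecOn with
  | nil => rfl
  | append_singleton l p ih =>
    rw [List.foldl_append, List.reverse_append]
    simp only [List.foldl_cons, List.foldl_nil, List.reverse_singleton, List.singleton_append]
    by_cases hp : p.1 ≤ s
    · rw [if_pos hp, List.find?_cons_of_pos (by simpa using hp)]
      rfl
    · rw [if_neg hp, List.find?_cons_of_neg (by simpa using hp)]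
      exact ih

lemma sbfLoop_spec (ks : List String) (s : String)
    (hmono : ∀ i j, i ≤ j → j < ks.length → ks.getD j "" ≤ s → ks.getD i "" ≤ s) :
    ∀ n lo hi, hi - lo ≤ n → lo ≤ hi → hi ≤ ks.length →
      (∀ j, j < lo → j < ks.length → ks.getD j "" ≤ s) →
      (∀ j, hi ≤ j → j < ks.length → ¬ ks.getD j "" ≤ s) →
      sbfLoop ks s lo hi ≤ ks.length ∧
      (∀ j, j < sbfLoop ks s lo hi → j < ks.length → ks.getD j "" ≤ s) ∧
      (∀ j, sbfLoop ks s lo hi ≤ j → j < ks.length → ¬ ks.getD j "" ≤ s) := by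
  intro n
  induction n with
  | zero =>
    intro lo hi hn hle hhi h1 h2
    have : lo = hi := by omega
    rw [sbfLoop]
    simp only [show ¬ lo < hi by omega, if_false]
    exact ⟨by omega, h1, this ▸ h2⟩
  | succ m ih =>
    intro lo hi hn hle hhi h1 h2
    rw [sbfLoop]
    by_cases hlt : lo < hi
    · simp only [hlt, if_true]
      have hmid1 : lo ≤ (lo + hi) / 2 := by omega
      have hmid2 : (lo + hi) / 2 < hi := by omega
      by_cases hc : ks.getD ((lo + hi) / 2) "" ≤ s
      · simp only [hc, if_true]
        exact ih ((lo + hi) / 2 + 1) hi (by omega) (by omega) hhi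
          (fun j hj hjl => hmono j ((lo + hi) / 2) (by omega) (by omega) hc) h2
      · simp only [hc, if_false]
        refine ih lo ((lo + hi) / 2) (by omega) (by omega) (by omega) h1 ?_
        intro j hj hjl hjs
        by_cases hjh : hi ≤ j
        · exact h2 j hjh hjl hjs
        · exact hc (hmono ((lo + hi) / 2) j hj hjl hjs)
    · simp only [hlt, if_false]
      have : lo = hi := by omega
      exact ⟨by omega, h1, this ▸ h2⟩

lemma find?_reverse_at {e : List (String × String)} {s : String} {r : Nat}
    (hr : 0 < r) (hrlen : r ≤ e.length)
    (hpos : ∀ j, j < r → (h : j < e.length) → e[j].1 ≤ s)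
    (hneg : ∀ j, r ≤ j → (h : j < e.length) → ¬ e[j].1 ≤ s) :
    e.reverse.find? (fun p => decide (p.1 ≤ s)) = some (e[r - 1]'(by omega)) := by
  rw [show e.reverse = (e.drop r).reverse ++ (e.take r).reverse by
        rw [← List.reverse_append, List.take_append_drop]]
  rw [List.find?_append]
  have hdropnone : (e.drop r).reverse.find? (fun p => decide (p.1 ≤ s)) = none := by
    apply List.find?_eq_none.mpr
    intro x hx
    rw [List.mem_reverse] at hx
    obtain ⟨i, hi, hxi⟩ := List.mem_iff_getElem.mp hx
    have : (e.drop r)[i] = e[r + i]'(by simp at hi; omega) := by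
      simp [List.getElem_drop]
    rw [this] at hxi
    subst hxi
    simpa using hneg (r + i) (by omega) (by simp at hi; omega)
  rw [hdropnone, Option.none_or]
  obtain ⟨r', rfl⟩ : ∃ r', r = r' + 1 := ⟨r - 1, (Nat.succ_pred_eq_of_pos hr).symm⟩
  simp only [Nat.add_sub_cancel]
  have htake : e.take (r' + 1) = e.take r' ++ [e[r']'(by omega)] := by
    rw [List.take_add_one]
    congr 1
    simp [List.getElem?_eq_getElem (show r' < e.length by omega)]
  rw [htake, List.reverse_append]
  simp only [List.reverse_singleton, List.singleton_append]
  rw [List.find?_cons_of_pos (by simpa using hpos r' (by omega) (by omega))]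

lemma label_eq (bs : List (String × String)) (s d : String) :
    (if sbfLoop ((effList bs).map Prod.fst) s 0 ((effList bs).map Prod.fst).length = 0 then d
     else ((effList bs).map Prod.snd).getD
       (sbfLoop ((effList bs).map Prod.fst) s 0 ((effList bs).map Prod.fst).length - 1) d)
      = bs.foldl (fun lab p => if p.1 ≤ s then p.2 else lab) d := by
  rw [foldA_eq_find, ← eff_find]
  set e := effList bs with he
  set ks := e.map Prod.fst with hks
  have hlen : ks.length = e.length := by simp [hks]
  have hsort := eff_sorted bs
  rw [← he] at hsort
  have hgetD : ∀ j (hj : j < e.length), ks.getD j "" = (e[j]'hj).1 := by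
    intro j hj
    rw [List.getD_eq_getElem ks "" (by omega)]
    simp [hks]
  have hmono : ∀ i j, i ≤ j → j < ks.length → ks.getD j "" ≤ s → ks.getD i "" ≤ s := by
    intro i j hij hj hjs
    rcases eq_or_lt_of_le hij with rfl | hij
    · exact hjs
    · rw [hgetD j (by omega)] at hjs
      rw [hgetD i (by omega)]
      have := List.pairwise_iff_getElem.mp hsort i j (by omega) (by omega) hij
      exact le_trans (le_of_lt this) hjs
  obtain ⟨hr1, hr2, hr3⟩ := sbfLoop_spec ks s hmono (ks.length) 0 ks.length (by omega) (by omega)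
    (le_refl _) (by omega) (by omega)
  set r := sbfLoop ks s 0 ks.length with hrdef
  by_cases hr0 : r = 0
  · simp only [hr0, if_true]
    have hnone : e.reverse.find? (fun p => decide (p.1 ≤ s)) = none := by
      apply List.find?_eq_none.mpr
      intro x hx
      rw [List.mem_reverse] at hx
      obtain ⟨i, hi, hxi⟩ := List.mem_iff_getElem.mp hx
      subst hxi
      have hne := hr3 i (by omega) (by omega)
      rw [hgetD i hi] at hne
      simpa using hne
    rw [hnone]; rfl
  · simp only [hr0, if_false]
    have hfind : e.reverse.find? (fun p => decide (p.1 ≤ s)) = some (e[r - 1]'(by omega)) := by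
      apply find?_reverse_at (by omega) (by omega)
      · intro j hj hjl
        have := hr2 j hj (by omega)
        rwa [hgetD j hjl] at this
      · intro j hj hjl hjs
        exact hr3 j hj (by omega) (by rwa [hgetD j hjl])
    rw [hfind]
    rw [List.getD_eq_getElem (e.map Prod.snd) d (by simp; omega)]
    simp

-- ===== VERDICT (by name: the statement is the Claim_ definition above) =====
theorem segment_by_field_spec : Claim_equal_segment_by_field := by
  intro records field boundaries default _hdom
  unfold Spec_segment_by_field segment_by_field segment_by_field_alt
  rw [effFold]
  apply List.map_congr_left
  intro record _
  cases hv : (PySem.Dict.mk record).get? field with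
  | none => simp [hv]
  | some v =>
    simp only [hv]
    rw [label_eq boundaries v default]
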